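-- pv_equiv track=rewrite | github.com/teljoa/p | PYTHON/Tema 2/Ejercicios/Boletin Modular 2/Boletin completo.py | getNumberOfDigitsDecimal
-- ===== SOURCE A (Python) =====
-- def getNumberOfDigitsDecimal(number):
--     count=0
--     listdot=" "
--     listothers=""
--     for i in range(len(number)):
--         if(number[i]=="."):
--             listdot+=number[i]
--         if not(number[i]=="0" or number[i]=="1" or number[i]=="2" or number[i]=="3" or number[i]=="4" or number[i]=="5" or number[i]=="6" or number[i]=="7" or number[i]=="8" or number[i]=="9" or number[i]=="." or number[i]=="-"):
--             listothers+=number[i]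
--         if(len(listothers)>0)or("-"in number[1:-1])or("-"in number[-1])or("." in (number[0] or number[-1]))or(".." in number)or(".." in listdot)or ("-." in number):
--             count=None
--         elif ("0" in number[i]) or ("1"in number[i]) or ("2"in number[i]) or ("3"in number[i]) or ("4"in number[i]) or ("5"in number[i]) or ("6"in number[i]) or ("7"in number[i]) or ("8"in number[i]) or("9"in number[i]):
--             count+=1
--     return count
-- ===== SOURCE B (Python) =====
-- def getNumberOfDigitsDecimal(number):
--     if number == "":
--         return 0
--     invalid = (any(c not in "0123456789.-" for c in number)
--                or "-" in number[1:-1]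
--                or number[-1] == "-"
--                or number[0] == "."
--                or number.count(".") >= 2
--                or "-." in number)
--     if invalid:
--         return None
--     return sum(1 for c in number if c in "0123456789")
-- ===== Notes on version B (the rewrite author's own statement) =====
-- stated objective: simpler
-- what changed: A's per-index loop that accumulates dot/other-character lists and re-evaluates a seven-way validity condition at every character is replaced by an empty-string guard, one whole-string validity boolean built from direct string-level predicates (bad character, inner or trailing minus, leading dot, two dots, minus-dot), and a single digit-counting pass.
import Mathlib
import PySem

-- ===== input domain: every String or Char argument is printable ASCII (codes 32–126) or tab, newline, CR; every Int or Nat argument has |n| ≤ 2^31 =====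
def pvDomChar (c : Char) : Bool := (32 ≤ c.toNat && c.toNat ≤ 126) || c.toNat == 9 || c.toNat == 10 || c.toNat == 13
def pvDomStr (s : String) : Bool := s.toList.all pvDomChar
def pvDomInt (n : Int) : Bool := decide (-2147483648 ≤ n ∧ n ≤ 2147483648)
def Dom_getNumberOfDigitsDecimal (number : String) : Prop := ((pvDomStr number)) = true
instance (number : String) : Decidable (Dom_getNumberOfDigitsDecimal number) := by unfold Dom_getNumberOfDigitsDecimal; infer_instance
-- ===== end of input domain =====

-- B replaces A's per-character accumulator loop with whole-string predicates plus one counting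
-- pass, for simplicity; A and B are proved to return the same value on every string.

-- ===== PORT A =====
-- A-side helpers (the pieces of A's loop body, transliterated).
-- the `if not(number[i]=="0" or … or number[i]=="-")` guard of A:
def pvIsOtherA (c : Char) : Bool :=
  !(c == '0' || c == '1' || c == '2' || c == '3' || c == '4' || c == '5' || c == '6' ||
    c == '7' || c == '8' || c == '9' || c == '.' || c == '-')

-- the `elif ("0" in number[i]) or … or ("9" in number[i])` guard of A (number[i] is one char):
def pvIsDigitA (c : Char) : Bool :=
  PySem.Chars.isIn ['0'] [c] || PySem.Chars.isIn ['1'] [c] || PySem.Chars.isIn ['2'] [c] ||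
  PySem.Chars.isIn ['3'] [c] || PySem.Chars.isIn ['4'] [c] || PySem.Chars.isIn ['5'] [c] ||
  PySem.Chars.isIn ['6'] [c] || PySem.Chars.isIn ['7'] [c] || PySem.Chars.isIn ['8'] [c] ||
  PySem.Chars.isIn ['9'] [c]

-- A's big `if` condition, in A's order; `number[-1]`/`number[0]` are read with pyGetD — inside the
-- loop the string is nonempty so the index is always in range and the default is never used;
-- `(number[0] or number[-1])` is `number[0]` since a one-char string is truthy.
def pvCondA (cs ld lo : List Char) : Bool :=
  decide (lo.length > 0)
  || PySem.Chars.isIn ['-'] (PySem.List.slice cs (some 1) (some (-1)))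
  || PySem.Chars.isIn ['-'] [PySem.List.pyGetD cs (-1) ' ']
  || PySem.Chars.isIn ['.'] [PySem.List.pyGetD cs 0 ' ']
  || PySem.Chars.isIn ['.', '.'] cs
  || PySem.Chars.isIn ['.', '.'] ld
  || PySem.Chars.isIn ['-', '.'] cs

-- one iteration of A's for-loop over state (count, listdot, listothers); `count += 1` is
-- Option.map (· + 1): the elif is only reached with the condition false, where count is not None
-- (proved below), so this is exact.
def pvStepA (cs : List Char) (st : Option Int × List Char × List Char) (c : Char) :
    Option Int × List Char × List Char :=
  let listdot := if c == '.' then st.2.1 ++ [c] else st.2.1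
  let listothers := if pvIsOtherA c then st.2.2 ++ [c] else st.2.2
  if pvCondA cs listdot listothers then (none, listdot, listothers)
  else if pvIsDigitA c then (st.1.map (· + 1), listdot, listothers)
  else (st.1, listdot, listothers)

def getNumberOfDigitsDecimal (number : String) : Option Int :=
  ((PySem.List.pyRange 0 (PySem.List.len number.toList)).foldl
      (fun st i => pvStepA number.toList st (PySem.List.pyGetD number.toList i ' '))
      (some 0, [' '], [])).1

-- ===== PORT B =====
def pvInvalidB (cs : List Char) : Bool :=
  cs.any (fun c => !(PySem.Chars.isIn [c] "0123456789.-".toList))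
  || PySem.Chars.isIn ['-'] (PySem.List.slice cs (some 1) (some (-1)))
  || (PySem.List.pyGetD cs (-1) ' ' == '-')   -- number[-1] == "-"; the list is nonempty here
  || (PySem.List.pyGetD cs 0 ' ' == '.')
  || decide (PySem.Chars.count cs ['.'] ≥ 2)
  || PySem.Chars.isIn ['-', '.'] cs

def getNumberOfDigitsDecimal_alt (number : String) : Option Int :=
  if number.toList.isEmpty then some 0
  else if pvInvalidB number.toList then none
  else some ((number.toList.map
      (fun c => if PySem.Chars.isIn [c] "0123456789".toList then (1 : Int) else 0)).sum)

-- ===== PRECONDITION & SPEC =====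
def Spec_getNumberOfDigitsDecimal (number : String) (out : Option Int) : Prop := out = getNumberOfDigitsDecimal_alt number
instance (number : String) (out : Option Int) : Decidable (Spec_getNumberOfDigitsDecimal number out) := by unfold Spec_getNumberOfDigitsDecimal; infer_instance

-- ===== CLAIM (what is proved, stated in full; the proofs are below) =====
def Claim_equal_getNumberOfDigitsDecimal : Prop := ∀ (number : String), Dom_getNumberOfDigitsDecimal number → Spec_getNumberOfDigitsDecimal number (getNumberOfDigitsDecimal number)

-- ===== LEMMAS AND PROOFS =====

-- the disjuncts of pvCondA that depend only on the full string
def pvStaticA (cs : List Char) : Bool :=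
  PySem.Chars.isIn ['-'] (PySem.List.slice cs (some 1) (some (-1)))
  || PySem.Chars.isIn ['-'] [PySem.List.pyGetD cs (-1) ' ']
  || PySem.Chars.isIn ['.'] [PySem.List.pyGetD cs 0 ' ']
  || PySem.Chars.isIn ['.', '.'] cs
  || PySem.Chars.isIn ['-', '.'] cs

lemma pvCondA_of_static {cs : List Char} (h : pvStaticA cs = true) (ld lo : List Char) :
    pvCondA cs ld lo = true := by
  simp only [pvStaticA, Bool.or_eq_true] at h
  simp only [pvCondA, Bool.or_eq_true]
  tauto

lemma pvCondA_mono {cs ld lo : List Char} (X Y : List Char) (h : pvCondA cs ld lo = true) :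
    pvCondA cs (ld ++ X) (lo ++ Y) = true := by
  simp only [pvCondA, Bool.or_eq_true, decide_eq_true_eq, PySem.Chars.isIn_iff_infix] at h ⊢
  rcases h with ((((((h | h) | h) | h) | h) | h) | h)
  · exact Or.inl (Or.inl (Or.inl (Or.inl (Or.inl (Or.inl (by simp; omega))))))
  · exact Or.inl (Or.inl (Or.inl (Or.inl (Or.inl (Or.inr h)))))
  · exact Or.inl (Or.inl (Or.inl (Or.inl (Or.inr h))))
  · exact Or.inl (Or.inl (Or.inl (Or.inr h)))
  · exact Or.inl (Or.inl (Or.inr h))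
  · exact Or.inl (Or.inr (List.infix_append_of_infix_left h))
  · exact Or.inr h

-- if the static part of the condition is true, every iteration sets count to None
lemma pvLoop_static {cs : List Char} (h : pvStaticA cs = true) (rest : List Char)
    (st : Option Int × List Char × List Char) :
    ((rest.foldl (pvStepA cs) st).1) = if rest.isEmpty then st.1 else none := by
  induction rest generalizing st with
  | nil => simp
  | cons c r ih =>
    simp only [List.foldl_cons, pvStepA, pvCondA_of_static h, if_true]
    rw [ih]
    cases r <;> simp

-- loop invariant: the final count is None iff the condition holds with the fully accumulated
-- lists, and otherwise the digits of the remaining suffix are added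
lemma pvLoop_inv (cs : List Char) (rest : List Char) (cnt : Option Int) (ld lo : List Char)
    (H : pvCondA cs ld lo = true → cnt = none) :
    ((rest.foldl (pvStepA cs) (cnt, ld, lo)).1) =
      if pvCondA cs (ld ++ rest.filter (· == '.')) (lo ++ rest.filter pvIsOtherA)
      then none else cnt.map (· + (rest.countP pvIsDigitA : Int)) := by
  induction rest generalizing cnt ld lo with
  | nil =>
    simp only [List.foldl_nil, List.filter_nil, List.append_nil, List.countP_nil]
    by_cases h : pvCondA cs ld lo = true
    · simp [h, H h]
    · simp only [Bool.not_eq_true] at h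
      cases cnt <;> simp [h]
  | cons c r ih =>
    have hfd : (if c == '.' then ld ++ [c] else ld) ++ r.filter (· == '.')
        = ld ++ (c :: r).filter (· == '.') := by
      by_cases hc : c == '.' <;> simp [hc]
    have hfo : (if pvIsOtherA c then lo ++ [c] else lo) ++ r.filter pvIsOtherA
        = lo ++ (c :: r).filter pvIsOtherA := by
      by_cases hc : pvIsOtherA c <;> simp [hc]
    simp only [List.foldl_cons, pvStepA]
    by_cases hcond : pvCondA cs (if c == '.' then ld ++ [c] else ld)
        (if pvIsOtherA c then lo ++ [c] else lo) = true
    · rw [if_pos hcond, ih _ _ _ (fun _ => rfl), hfd, hfo]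
      have hmono : pvCondA cs (ld ++ (c :: r).filter (· == '.'))
          (lo ++ (c :: r).filter pvIsOtherA) = true := by
        rw [← hfd, ← hfo]; exact pvCondA_mono _ _ hcond
      simp [hmono]
    · have hcnt : (c :: r).countP pvIsDigitA
          = r.countP pvIsDigitA + (if pvIsDigitA c then 1 else 0) := by
        simp [List.countP_cons]
      rw [if_neg hcond]
      by_cases hd : pvIsDigitA c
      · rw [if_pos hd, ih _ _ _ (fun hc => absurd hc hcond), hfd, hfo]
        by_cases hf : pvCondA cs (ld ++ (c :: r).filter (· == '.'))
            (lo ++ (c :: r).filter pvIsOtherA) = true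
        · simp [hf]
        · cases cnt with
          | none => simp
          | some v =>
            rw [if_neg hf, if_neg hf]
            simp only [Option.map_some, Option.some.injEq, hcnt, hd, if_true]
            push_cast
            ring
      · rw [if_neg hd, ih _ _ _ (fun hc => absurd hc hcond), hfd, hfo]
        cases cnt <;> simp [hcnt, hd]

-- Chars.count with a single-character needle is List.count
lemma pvCountGo_singleton (c : Char) (fuel : Nat) (l : List Char) (acc : Nat)
    (h : l.length ≤ fuel) : PySem.Chars.count.go [c] fuel l acc = acc + l.count c := by
  induction fuel generalizing l acc with
  | zero =>
    have hl : l = [] := by cases l <;> simp_all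
    simp [hl, PySem.Chars.count.go]
  | succ n ih =>
    cases l with
    | nil => simp [PySem.Chars.count.go]
    | cons a t =>
      simp only [PySem.Chars.count.go]
      by_cases hp : [c].isPrefixOf (a :: t)
      · have ha : c = a := by simpa [List.isPrefixOf] using hp
        have hdrop : List.drop [c].length (a :: t) = t := by simp
        simp only [hp, if_true, hdrop]
        rw [ih t (acc + 1) (by simpa using h)]
        simp [ha]
        omega
      · have ha : ¬ c = a := by simpa [List.isPrefixOf] using hp
        simp only [hp]
        rw [ih t acc (by simpa using h)]
        simp [show ¬a = c from fun hh => ha hh.symm]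

lemma pvCount_singleton (l : List Char) (c : Char) :
    PySem.Chars.count l [c] = l.count c := by
  simpa using pvCountGo_singleton c l.length l 0 le_rfl

-- ['.','.'] is an infix of ' ' :: all-dots-of-cs  iff  cs has ≥ 2 dots
lemma pvDotDot_iff (cs : List Char) :
    PySem.Chars.isIn ['.', '.'] (' ' :: cs.filter (· == '.')) = true
      ↔ 2 ≤ cs.count '.' := by
  rw [PySem.Chars.isIn_iff_infix, List.filter_beq]
  constructor
  · intro h
    have := h.count_le '.'
    simpa using this
  · intro h
    refine ⟨[' '], List.replicate (cs.count '.' - 2) '.', ?_⟩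
    have h2 : cs.count '.' = 2 + (cs.count '.' - 2) := by omega
    rw [h2, List.replicate_add]
    simp

-- A's "other character" test agrees with B's membership test
lemma pvOther_eq (c : Char) :
    pvIsOtherA c = !(PySem.Chars.isIn [c] "0123456789.-".toList) := by
  have hs : "0123456789.-".toList = ['0','1','2','3','4','5','6','7','8','9','.','-'] := rfl
  rw [hs, Bool.eq_iff_iff]
  simp [pvIsOtherA, PySem.Chars.isIn_eq_false_iff, List.singleton_infix_iff]
  tauto

-- A's digit test agrees with B's membership test
lemma pvDigit_eq (c : Char) :
    pvIsDigitA c = PySem.Chars.isIn [c] "0123456789".toList := by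
  have hs : "0123456789".toList = ['0','1','2','3','4','5','6','7','8','9'] := rfl
  rw [hs, Bool.eq_iff_iff]
  simp [pvIsDigitA, PySem.Chars.isIn_iff_infix, List.singleton_infix_iff]
  tauto

-- the two validity conditions coincide, and so do the two digit counts
lemma pvMain (cs : List Char) :
    ((PySem.List.pyRange 0 (PySem.List.len cs)).foldl
        (fun st i => pvStepA cs st (PySem.List.pyGetD cs i ' ')) (some 0, [' '], [])).1
    = (if cs.isEmpty then some 0
       else if pvInvalidB cs then none
       else some ((cs.map
          (fun c => if PySem.Chars.isIn [c] "0123456789".toList then (1 : Int) else 0)).sum)) := by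
  rw [PySem.List.foldl_pyRange_pyGetD cs ' ' (pvStepA cs) _ le_rfl]
  by_cases hcs : cs = []
  · subst hcs; simp
  · rw [if_neg (by simpa using hcs)]
    rw [show (List.drop (0 : Int).toNat cs) = cs by simp]
    have hsum : (cs.map (fun c => if PySem.Chars.isIn [c] "0123456789".toList
        then (1 : Int) else 0)).sum = (cs.countP pvIsDigitA : Int) := by
      rw [PySem.List.sum_map_ite_one_zero]
      exact congrArg _ (List.countP_congr (fun c _ => by rw [pvDigit_eq]))
    by_cases hstat : pvStaticA cs = true
    · rw [pvLoop_static hstat cs _, if_neg (by simpa using hcs)]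
      have hinv : pvInvalidB cs = true := by
        simp only [pvStaticA, Bool.or_eq_true] at hstat
        simp only [pvInvalidB, Bool.or_eq_true, decide_eq_true_eq]
        rcases hstat with ((((h | h) | h) | h) | h)
        · tauto
        · rw [PySem.Chars.isIn_iff_infix, List.singleton_infix_iff,
              List.mem_singleton] at h
          exact Or.inl (Or.inl (Or.inl (Or.inr (by simp [h.symm]))))
        · rw [PySem.Chars.isIn_iff_infix, List.singleton_infix_iff,
              List.mem_singleton] at h
          exact Or.inl (Or.inl (Or.inr (by simp [h.symm])))
        · rw [PySem.Chars.isIn_iff_infix] at h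
          have := h.count_le '.'
          simp only [List.count_cons_self, List.count_nil] at this
          exact Or.inl (Or.inr (by rw [pvCount_singleton]; omega))
        · tauto
      rw [if_pos hinv]
    · obtain ⟨⟨⟨⟨h1, h2⟩, h3⟩, h4⟩, h5⟩ :
          (((PySem.Chars.isIn ['-'] (PySem.List.slice cs (some 1) (some (-1))) = false ∧
             PySem.Chars.isIn ['-'] [PySem.List.pyGetD cs (-1) ' '] = false) ∧
             PySem.Chars.isIn ['.'] [PySem.List.pyGetD cs 0 ' '] = false) ∧
             PySem.Chars.isIn ['.', '.'] cs = false) ∧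
             PySem.Chars.isIn ['-', '.'] cs = false := by
        simpa [pvStaticA, Bool.or_eq_false_iff] using hstat
      have h0 : pvCondA cs [' '] [] = false := by
        simp [pvCondA, h1, h2, h3, h4, h5,
          show PySem.Chars.isIn ['.', '.'] [' '] = false from by decide]
      rw [pvLoop_inv cs cs (some 0) [' '] [] (by simp [h0])]
      have hb2 : (PySem.List.pyGetD cs (-1) ' ' == '-') = false := by
        rw [PySem.Chars.isIn_eq_false_iff, List.singleton_infix_iff,
            List.mem_singleton] at h2
        simp only [beq_eq_false_iff_ne, ne_eq]
        exact fun hh => h2 hh.symm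
      have hb3 : (PySem.List.pyGetD cs 0 ' ' == '.') = false := by
        rw [PySem.Chars.isIn_eq_false_iff, List.singleton_infix_iff,
            List.mem_singleton] at h3
        simp only [beq_eq_false_iff_ne, ne_eq]
        exact fun hh => h3 hh.symm
      have hany : cs.any (fun c => !(PySem.Chars.isIn [c] "0123456789.-".toList))
          = !(cs.filter pvIsOtherA).isEmpty := by
        rw [Bool.eq_iff_iff]
        simp only [List.any_eq_true, Bool.not_eq_true', List.isEmpty_eq_false_iff, ne_eq]
        constructor
        · rintro ⟨c, hc, hp⟩ hnil
          have := List.filter_eq_nil_iff.mp hnil c hc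
          rw [pvOther_eq, hp] at this
          simp at this
        · intro hne
          obtain ⟨c, hc⟩ := List.exists_mem_of_ne_nil _ hne
          have hcm := List.mem_filter.mp hc
          exact ⟨c, hcm.1, by have := hcm.2; rw [pvOther_eq] at this; simpa using this⟩
      have hcond : pvCondA cs ([' '] ++ cs.filter (· == '.')) ([] ++ cs.filter pvIsOtherA)
          = pvInvalidB cs := by
        rw [Bool.eq_iff_iff]
        simp only [pvCondA, pvInvalidB, List.nil_append, List.singleton_append,
          Bool.or_eq_true, decide_eq_true_eq, h1, h2, h3, h4, h5, hb2, hb3, hany,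
          pvCount_singleton, Bool.false_eq_true, or_false,
          Bool.not_eq_true', List.isEmpty_eq_false_iff, ne_eq, List.length_pos_iff]
        rw [pvDotDot_iff]
      rw [hcond, hsum]
      by_cases hinv : pvInvalidB cs = true
      · simp [hinv]
      · simp only [Bool.not_eq_true] at hinv
        simp [hinv]

-- ===== VERDICT (by name: the statement is the Claim_ definition above) =====
theorem getNumberOfDigitsDecimal_spec : Claim_equal_getNumberOfDigitsDecimal := by
  intro number _
  show getNumberOfDigitsDecimal number = getNumberOfDigitsDecimal_alt number
  exact pvMain number.toList
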